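-- pv_equiv track=rewrite | github.com/xxSylarxx/lector-omr-python | app/main.py | _bloque_principal
-- ===== SOURCE A (Python) =====
-- def _bloque_principal(centros, max_gap=35):
--     if not centros:
--         return centros
--     s = sorted(centros)
--     mejor, actual = [s[0]], [s[0]]
--     for prev, curr in zip(s, s[1:]):
--         if curr - prev <= max_gap:
--             actual.append(curr)
--         else:
--             if len(actual) > len(mejor):
--                 mejor = actual
--             actual = [curr]
--     return mejor if len(mejor) >= len(actual) else actual
-- ===== SOURCE B (Python) =====
-- def _bloque_principal(centros, max_gap=35):
--     if not centros:
--         return centros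
--     s = sorted(centros)
--     breaks = [i for i in range(1, len(s)) if s[i] - s[i - 1] > max_gap]
--     bounds = [0] + breaks + [len(s)]
--     start = end = 0
--     for a, b in zip(bounds, bounds[1:]):
--         if b - a > end - start:
--             start, end = a, b
--     return s[start:end]
-- ===== Notes on version B (the rewrite author's own statement) =====
-- stated objective: alternative
-- what changed: B replaces A's two growing candidate lists and in-loop best tracking by integer boundary bookkeeping: one pass collects break indices, then the boundary list (zero, breaks, length) is scanned pairwise for the earliest longest segment, which is returned as a single slice.
import Mathlib
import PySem

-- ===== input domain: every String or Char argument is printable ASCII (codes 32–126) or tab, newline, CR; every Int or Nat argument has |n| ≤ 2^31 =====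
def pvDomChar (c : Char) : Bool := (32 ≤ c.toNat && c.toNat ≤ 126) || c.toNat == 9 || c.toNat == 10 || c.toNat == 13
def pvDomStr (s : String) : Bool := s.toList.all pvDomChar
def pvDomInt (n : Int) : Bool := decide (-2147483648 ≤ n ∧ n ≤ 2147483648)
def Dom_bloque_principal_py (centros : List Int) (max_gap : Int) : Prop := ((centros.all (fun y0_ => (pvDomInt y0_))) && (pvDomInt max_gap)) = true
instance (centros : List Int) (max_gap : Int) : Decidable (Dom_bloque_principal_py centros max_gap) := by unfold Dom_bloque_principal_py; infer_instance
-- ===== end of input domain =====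

-- B keeps integer break/boundary bookkeeping instead of A's two growing candidate lists (objective: alternative decomposition).

-- ===== PORT A =====
def bloque_principal_py (centros : List Int) (max_gap : Int) : List Int :=
  if centros = [] then centros
  else
    let s := PySem.List.sorted centros (fun x => x) false
    -- s[0]: s is nonempty here, so pyGetD with default 0 is exact
    let x0 := PySem.List.pyGetD s 0 0
    let res := (s.zip (PySem.List.slice s (some 1) none)).foldl
      (fun (st : List Int × List Int) (pc : Int × Int) =>
        if pc.2 - pc.1 ≤ max_gap then (st.1, st.2 ++ [pc.2])
        else (if st.2.length > st.1.length then st.2 else st.1, [pc.2]))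
      ([x0], [x0])
    if res.1.length ≥ res.2.length then res.1 else res.2

-- ===== PORT B =====
def bloque_principal_py_alt (centros : List Int) (max_gap : Int) : List Int :=
  if centros = [] then centros
  else
    let s := PySem.List.sorted centros (fun x => x) false
    -- s[i], s[i-1]: i ranges over [1, len(s)), both indices in range, so pyGetD with default 0 is exact
    let breaks := (PySem.List.pyRange 1 (s.length : Int) 1).filter
      (fun i => PySem.List.pyGetD s i 0 - PySem.List.pyGetD s (i - 1) 0 > max_gap)
    let bounds := (0 : Int) :: (breaks ++ [(s.length : Int)])
    let fin := (bounds.zip bounds.tail).foldl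
      (fun (p q : Int × Int) => if q.2 - q.1 > p.2 - p.1 then q else p) (0, 0)
    PySem.List.slice s (some fin.1) (some fin.2)

-- ===== PRECONDITION & SPEC =====
def Spec_bloque_principal_py (centros : List Int) (max_gap : Int) (out : List Int) : Prop := out = bloque_principal_py_alt centros max_gap
instance (centros : List Int) (max_gap : Int) (out : List Int) : Decidable (Spec_bloque_principal_py centros max_gap out) := by unfold Spec_bloque_principal_py; infer_instance

-- ===== CLAIM (what is proved, stated in full; the proofs are below) =====
def Claim_equal_bloque_principal_py : Prop := ∀ (centros : List Int) (max_gap : Int), Dom_bloque_principal_py centros max_gap → Spec_bloque_principal_py centros max_gap (bloque_principal_py centros max_gap)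

-- ===== LEMMAS AND PROOFS =====

-- the maximal runs of s = x :: t with adjacent gaps ≤ g
def pvRuns (g : Int) : Int → List Int → List (List Int)
  | x, [] => [[x]]
  | x, y :: t =>
    if y - x ≤ g then
      match pvRuns g y t with
      | [] => [[x]]
      | r :: rs => (x :: r) :: rs
    else [x] :: pvRuns g y t

-- cumulative end positions of the runs, starting at offset o
def pvEnds (o : Nat) : List (List Int) → List Nat
  | [] => []
  | r :: rs => (o + r.length) :: pvEnds (o + r.length) rs

theorem pvRuns_head (g x : Int) (t : List Int) :
    ∃ r' rs, pvRuns g x t = (x :: r') :: rs := by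
  induction t generalizing x with
  | nil => exact ⟨[], [], rfl⟩
  | cons y t ih =>
    obtain ⟨r', rs, h⟩ := ih y
    by_cases hle : y - x ≤ g
    · exact ⟨y :: r', rs, by simp [pvRuns, hle, h]⟩
    · exact ⟨[], pvRuns g y t, by simp [pvRuns, hle]⟩

theorem pvRuns_flatten (g x : Int) (t : List Int) :
    (pvRuns g x t).flatten = x :: t := by
  induction t generalizing x with
  | nil => simp [pvRuns]
  | cons y t ih =>
    by_cases hle : y - x ≤ g
    · obtain ⟨r', rs, h⟩ := pvRuns_head g y t
      have := ih y
      rw [h] at this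
      simp [pvRuns, hle, h]
      simpa using this
    · simp [pvRuns, hle, ih y]

theorem pvRuns_ne_nil_mem (g x : Int) (t : List Int) :
    ∀ r ∈ pvRuns g x t, r ≠ [] := by
  induction t generalizing x with
  | nil => simp [pvRuns]
  | cons y t ih =>
    by_cases hle : y - x ≤ g
    · obtain ⟨r', rs, h⟩ := pvRuns_head g y t
      intro r hr
      rw [pvRuns, if_pos hle, h] at hr
      rcases List.mem_cons.1 hr with h1 | h1
      · simp [h1]
      · exact ih y r (h ▸ List.mem_cons_of_mem _ h1)
    · intro r hr
      rw [pvRuns, if_neg hle] at hr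
      rcases List.mem_cons.1 hr with h1 | h1
      · simp [h1]
      · exact ih y r h1

theorem pvA_fold (g : Int) (t : List Int) : ∀ (x : Int) (m a r' : List Int) (rs : List (List Int)),
    pvRuns g x t = (x :: r') :: rs →
    (let res := ((x :: t).zip t).foldl
        (fun (st : List Int × List Int) (pc : Int × Int) =>
          if pc.2 - pc.1 ≤ g then (st.1, st.2 ++ [pc.2])
          else (if st.2.length > st.1.length then st.2 else st.1, [pc.2])) (m, a)
     if res.1.length ≥ res.2.length then res.1 else res.2)
    = ((a ++ r') :: rs).foldl (fun b r => if r.length > b.length then r else b) m := by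
  induction t with
  | nil =>
    intro x m a r' rs h
    rw [pvRuns] at h
    obtain ⟨h1, h2⟩ := by simpa using h
    subst h1; subst h2
    simp only [List.zip_nil_right, List.foldl_nil, List.foldl_cons, List.append_nil]
    split_ifs with h1 h2 <;> first | rfl | omega
  | cons y t ih =>
    intro x m a r' rs h
    by_cases hle : y - x ≤ g
    · obtain ⟨r₁, rs₁, h₁⟩ := pvRuns_head g y t
      rw [pvRuns, if_pos hle, h₁] at h
      simp only [List.cons.injEq] at h
      obtain ⟨⟨-, rfl⟩, rfl⟩ := h
      have := ih y m (a ++ [y]) r₁ rs₁ h₁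
      simp only [List.zip_cons_cons, List.foldl_cons, if_pos hle] at *
      rw [this]
      simp
    · rw [pvRuns, if_neg hle] at h
      obtain ⟨r₁, rs₁, h₁⟩ := pvRuns_head g y t
      simp only [List.cons.injEq] at h
      obtain ⟨⟨-, rfl⟩, rfl⟩ := h
      have := ih y (if a.length > m.length then a else m) [y] r₁ rs₁ h₁
      simp only [List.zip_cons_cons, List.foldl_cons, if_neg hle] at *
      rw [this, h₁]
      simp only [List.append_nil, List.foldl_cons, List.singleton_append]

theorem pvEnds_split : ∀ (rs : List (List Int)) (o : Nat), rs ≠ [] →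
    pvEnds o rs = (pvEnds o rs).dropLast ++ [o + rs.flatten.length] := by
  intro rs
  induction rs with
  | nil => simp
  | cons r rs ih =>
    intro o _
    cases rs with
    | nil => simp [pvEnds]
    | cons r' rs' =>
      have h := ih (o + r.length) (by simp)
      have hne : pvEnds (o + r.length) (r' :: rs') ≠ [] := by rw [pvEnds]; simp
      rw [pvEnds, List.dropLast_cons_of_ne_nil hne, List.cons_append]
      congr 1
      rw [h]
      congr 2
      simp [List.length_append]
      omega

theorem pvBreaks_eq (g : Int) (s : List Int) : ∀ (t : List Int) (o : Nat) (x : Int),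
    s.drop o = x :: t →
    (List.range' (o + 1) t.length).filter
        (fun i => decide (s.getD i 0 - s.getD (i - 1) 0 > g))
      = (pvEnds o (pvRuns g x t)).dropLast := by
  intro t
  induction t with
  | nil => intro o x h; simp [pvRuns, pvEnds]
  | cons y t ih =>
    intro o x h
    have hd : s.drop (o + 1) = y :: t := by
      rw [← List.tail_drop, h]; rfl
    have hx : s.getD o 0 = x := by
      have : s[o]? = some x := by
        have : (s.drop o)[0]? = s[o+0]? := List.getElem?_drop
        rw [h] at this; simpa using this.symm
      simp [List.getD_eq_getElem?_getD, this]
    have hy : s.getD (o + 1) 0 = y := by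
      have : s[o + 1]? = some y := by
        have : (s.drop (o+1))[0]? = s[(o+1)+0]? := List.getElem?_drop
        rw [hd] at this; simpa using this.symm
      simp [List.getD_eq_getElem?_getD, this]
    rw [List.length_cons, List.range'_succ, List.filter_cons]
    have ihy := ih (o + 1) y hd
    by_cases hle : y - x ≤ g
    · have hpred : ¬ (s.getD (o + 1) 0 - s.getD (o + 1 - 1) 0 > g) := by
        simp only [Nat.add_sub_cancel, hx, hy]; omega
      simp only [decide_eq_true_eq, hpred, if_false, ihy]
      obtain ⟨r₁, rs₁, h₁⟩ := pvRuns_head g y t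
      simp only [pvRuns, if_pos hle, h₁]
      have hlen : o + (x :: y :: r₁).length = o + 1 + (y :: r₁).length := by
        simp [Nat.add_comm, Nat.add_left_comm]
      rw [pvEnds, pvEnds, hlen]
    · have hpred : s.getD (o + 1) 0 - s.getD (o + 1 - 1) 0 > g := by
        simp only [Nat.add_sub_cancel, hx, hy]; omega
      simp only [decide_eq_true_eq, hpred, if_true, ihy]
      rw [pvRuns, if_neg hle, pvEnds]
      have hne : pvEnds (o + [x].length) (pvRuns g y t) ≠ [] := by
        obtain ⟨r₁, rs₁, h₁⟩ := pvRuns_head g y t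
        rw [h₁, pvEnds]; simp
      rw [List.dropLast_cons_of_ne_nil hne]
      simp

theorem pvSel_eq (s : List Int) : ∀ (rs : List (List Int)) (o st en : Nat) (b : List Int),
    (∀ r ∈ rs, r ≠ []) → s.drop o = rs.flatten →
    b = (s.drop st).take (en - st) → st ≤ en → b.length = en - st →
    (let fin := (((o :: pvEnds o rs).zip (pvEnds o rs)).foldl
        (fun (p : Int × Int) (q : Nat × Nat) =>
          if (q.2 : Int) - (q.1 : Int) > p.2 - p.1 then ((q.1 : Int), (q.2 : Int)) else p)
        ((st : Int), (en : Int)))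
     PySem.List.slice s (some fin.1) (some fin.2))
    = rs.foldl (fun b r => if r.length > b.length then r else b) b := by
  intro rs
  induction rs with
  | nil =>
    intro o st en b hne hflat hb hle hlen
    simp only [pvEnds, List.zip_nil_right, List.foldl_nil]
    rw [PySem.List.slice_natCast]
    exact hb.symm
  | cons r rs ih =>
    intro o st en b hne hflat hb hle hlen
    have hrne : r ≠ [] := hne r (by simp)
    have hdo : s.drop o = r ++ rs.flatten := by simpa using hflat
    have hflat' : s.drop (o + r.length) = rs.flatten := by
      rw [← List.drop_drop, hdo, List.drop_left]
    simp only [pvEnds, List.zip_cons_cons, List.foldl_cons]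
    by_cases hcmp : ((o : Int) + r.length - o > (en : Int) - st)
    · have hc' : ((o + r.length : Nat) : Int) - (o : Nat) > (en : Int) - (st : Nat) := by
        push_cast; push_cast at hcmp; omega
      rw [if_pos hc']
      have hr : (s.drop o).take ((o + r.length) - o) = r := by
        rw [hdo, Nat.add_sub_cancel_left, List.take_left]
      have hih := ih (o + r.length) o (o + r.length) r (fun r hr => hne r (by simp [hr]))
        hflat' hr.symm (Nat.le_add_right _ _) (by omega)
      have hgt : r.length > b.length := by
        push_cast at hc'; omega
      rw [if_pos hgt]
      simpa using hih
    · have hc' : ¬ (((o + r.length : Nat) : Int) - (o : Nat) > (en : Int) - (st : Nat)) := by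
        push_cast; push_cast at hcmp; omega
      rw [if_neg hc']
      have hih := ih (o + r.length) st en b (fun r hr => hne r (by simp [hr]))
        hflat' hb hle hlen
      have hngt : ¬ (r.length > b.length) := by
        push_cast at hc'; omega
      rw [if_neg hngt]
      simpa using hih

-- ===== VERDICT (by name: the statement is the Claim_ definition above) =====
theorem bloque_principal_py_spec : Claim_equal_bloque_principal_py := by
  intro centros g _
  unfold Spec_bloque_principal_py bloque_principal_py bloque_principal_py_alt
  by_cases hc : centros = []
  · simp [hc]
  · rw [if_neg hc, if_neg hc]
    have hsne : PySem.List.sorted centros (fun x => x) false ≠ [] := by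
      intro h
      apply hc
      have := PySem.List.sorted_perm centros (fun x : Int => x) false
      rw [h] at this
      exact (List.perm_nil.mp this.symm).symm ▸ rfl
    obtain ⟨x, t, hxt⟩ := List.exists_cons_of_ne_nil hsne
    rw [hxt]
    dsimp only
    -- A side
    rw [PySem.List.slice_from_one, PySem.List.pyGetD_zero_cons]
    obtain ⟨r', rs, hruns⟩ := pvRuns_head g x t
    have hA := pvA_fold g t x [x] [x] r' rs hruns
    simp only [List.tail_cons] at *
    rw [hA]
    -- B side
    have hflat := pvRuns_flatten g x t
    have hRne : pvRuns g x t ≠ [] := by rw [hruns]; simp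
    have hlenf : (pvRuns g x t).flatten.length = t.length + 1 := by rw [hflat]; simp
    have h1 : PySem.List.pyRange 1 ((x :: t).length : Int) 1
        = (List.range' 1 t.length).map (fun i : Nat => (i : Int)) := by
      rw [PySem.List.pyRange_one, List.range'_eq_map_range, List.map_map]
      rw [show ((((x :: t).length : Int)) - 1).toNat = t.length by simp]
      apply List.map_congr_left
      intro k _
      simp
    have h2 : (List.range' 1 t.length).filter
          (fun i : Nat => decide (PySem.List.pyGetD (x :: t) (i : Int) 0
            - PySem.List.pyGetD (x :: t) ((i : Int) - 1) 0 > g))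
        = (List.range' 1 t.length).filter
          (fun i : Nat => decide ((x :: t).getD i 0 - (x :: t).getD (i - 1) 0 > g)) := by
      apply List.filter_congr
      intro i hi
      have h1i : 1 ≤ i := (List.mem_range'_1.mp hi).1
      rw [show ((i : Int) - 1) = ((i - 1 : Nat) : Int) by omega]
      rw [PySem.List.pyGetD_natCast, PySem.List.pyGetD_natCast]
    have h3 := pvBreaks_eq g (x :: t) t 0 x (by simp)
    have hfil : (PySem.List.pyRange 1 ((x :: t).length : Int) 1).filter
          (fun i => decide (PySem.List.pyGetD (x :: t) i 0
            - PySem.List.pyGetD (x :: t) (i - 1) 0 > g))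
        = ((pvEnds 0 (pvRuns g x t)).dropLast).map (fun i : Nat => (i : Int)) := by
      rw [h1, List.filter_map]
      simp only [Function.comp_def]
      rw [h2, h3]
    rw [hfil]
    have hb : ((pvEnds 0 (pvRuns g x t)).dropLast).map (fun i : Nat => (i : Int))
          ++ [((x :: t).length : Int)]
        = (pvEnds 0 (pvRuns g x t)).map (fun i : Nat => (i : Int)) := by
      conv_rhs => rw [pvEnds_split (pvRuns g x t) 0 hRne]
      rw [List.map_append]
      congr 1
      simp [hlenf]
    rw [hb]
    have hzip : ((0 : Int) :: (pvEnds 0 (pvRuns g x t)).map (fun i : Nat => (i : Int))).zip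
          ((pvEnds 0 (pvRuns g x t)).map (fun i : Nat => (i : Int)))
        = (((0 : Nat) :: pvEnds 0 (pvRuns g x t)).zip (pvEnds 0 (pvRuns g x t))).map
            (Prod.map (fun i : Nat => (i : Int)) (fun i : Nat => (i : Int))) := by
      rw [show ((0 : Int) :: (pvEnds 0 (pvRuns g x t)).map (fun i : Nat => (i : Int)))
          = ((0 : Nat) :: pvEnds 0 (pvRuns g x t)).map (fun i : Nat => (i : Int)) by simp]
      rw [List.zip_map]
    rw [hzip, List.foldl_map]
    have hsel := pvSel_eq (x :: t) (pvRuns g x t) 0 0 0 []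
      (pvRuns_ne_nil_mem g x t) (by simpa using hflat.symm) (by simp) (le_refl 0) (by simp)
    simp only [Nat.cast_zero] at hsel
    simp only [Prod.map]
    rw [hsel]
    -- both sides are now picks over the runs list
    rw [hruns]
    simp only [List.foldl_cons, List.singleton_append]
    congr 1
    cases r' with
    | nil => simp
    | cons z r'' => simp
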